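-- pv_equiv track=rewrite | github.com/AyudaEnPython/Soluciones | soluciones/eliminar_medio.py | eliminar
-- ===== SOURCE A (Python) =====
-- from typing import Any
--
-- def eliminar(arr: list, tmp: Any = None) -> list:
--     """Elimina el elemento en la posicion media. Si el tama침o es
--     par, elimina el elemento previo al punto medio.
--
--     :param arr: Secuencia de elementos
--     :arr type: list
--     :param tmp: Ultimo elemento de la secuencia
--     :tmp type: Any
--     :return: Secuencia sin el elemento de la posicion media
--     :rtype: list
--
--     >>> eliminar([1, 2, 3])
--     [1, 3]
--     >>> eliminar([1, 2, 3, 4])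
--     [1, 3, 4]
--     >>> eliminar(['x', 'y'])
--     ['y']
--     >>> eliminar(['a'])
--     []
--     """
--     if len(arr) <= 2:
--         arr.pop(0)
--         return arr
--     elif len(arr) % 2 == 1:
--         arr.pop(len(arr)//2)
--         if tmp is not None:
--             arr.append(tmp)
--         return arr
--     else:
--         tmp = arr.pop(-1)
--         return eliminar(arr, tmp=tmp)
-- ===== SOURCE B (Python) =====
-- def eliminar(arr, tmp=None):
--     n = len(arr)
--     if n <= 2:
--         arr.pop(0)
--         return arr
--     if n % 2 == 0:
--         tmp = arr.pop()   # even length: caller's tmp is discarded, last element saved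
--         n -= 1
--     arr.pop(n // 2)
--     if tmp is not None:
--         arr.append(tmp)
--     return arr
-- ===== Notes on version B (the rewrite author's own statement) =====
-- stated objective: simpler
-- what changed: Replaces A's tail recursion on even lengths by a single non-recursive pass that normalises to the odd case (save last, shrink, pop middle, re-append), with one shared pop/append epilogue.
-- outside the precondition, e.g. on eliminar([], None): A raises IndexError, B raises IndexError
import Mathlib
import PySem

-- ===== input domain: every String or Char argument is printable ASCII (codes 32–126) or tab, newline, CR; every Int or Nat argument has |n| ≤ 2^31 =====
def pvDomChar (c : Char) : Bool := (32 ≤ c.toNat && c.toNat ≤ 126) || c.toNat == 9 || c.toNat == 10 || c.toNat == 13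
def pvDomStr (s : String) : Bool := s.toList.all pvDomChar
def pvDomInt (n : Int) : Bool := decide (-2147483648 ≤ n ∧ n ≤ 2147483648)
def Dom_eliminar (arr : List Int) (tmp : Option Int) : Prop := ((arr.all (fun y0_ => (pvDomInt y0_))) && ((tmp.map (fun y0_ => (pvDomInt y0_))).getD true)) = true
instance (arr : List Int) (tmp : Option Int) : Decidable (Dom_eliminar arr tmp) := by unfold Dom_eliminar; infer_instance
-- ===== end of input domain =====

-- B replaces A's even-length tail recursion by one non-recursive normalising pass (objective: simpler).
-- Both programs mutate arr in place in Python; the equivalence proved here is about the return value.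

-- ===== PORT A =====
-- recursive, as in the Python: even length pops the last element and recurses with it as tmp
def eliminar (arr : List Int) (tmp : Option Int) : List Int :=
  if h : arr.length ≤ 2 then
    arr.tail                                   -- arr.pop(0); [] raises IndexError (excluded by Pre_)
  else if arr.length % 2 == 1 then
    let arr' := arr.take (arr.length / 2) ++ arr.drop (arr.length / 2 + 1)   -- arr.pop(len(arr)//2)
    match tmp with
    | some t => arr' ++ [t]
    | none => arr'
  else
    eliminar arr.dropLast arr.getLast?         -- tmp = arr.pop(-1); eliminar(arr, tmp=tmp)
termination_by arr.length
decreasing_by simp_all [List.length_dropLast]; omega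

-- ===== PORT B =====
-- non-recursive: normalise even length to the odd case, then one shared pop/append epilogue
def eliminar_alt (arr : List Int) (tmp : Option Int) : List Int :=
  let n := arr.length
  if n ≤ 2 then
    arr.tail                                   -- arr.pop(0); [] raises IndexError (excluded by Pre_)
  else
    let s : Option Int × List Int × Nat :=
      if n % 2 == 0 then (arr.getLast?, arr.dropLast, n - 1) else (tmp, arr, n)
    let arr' := s.2.1.take (s.2.2 / 2) ++ s.2.1.drop (s.2.2 / 2 + 1)         -- arr.pop(n // 2)
    match s.1 with
    | some t => arr' ++ [t]
    | none => arr'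

-- ===== PRECONDITION & SPEC =====
-- Pre_ excludes the empty list, on which both A and B raise IndexError from arr.pop(0).
def Pre_eliminar (arr : List Int) (tmp : Option Int) : Prop := arr ≠ []
instance (arr : List Int) (tmp : Option Int) : Decidable (Pre_eliminar arr tmp) := by
  unfold Pre_eliminar; infer_instance
def pvWitness_eliminar : List Int × Option Int := ([1, 2, 3], none)

def Spec_eliminar (arr : List Int) (tmp : Option Int) (out : List Int) : Prop := out = eliminar_alt arr tmp
instance (arr : List Int) (tmp : Option Int) (out : List Int) : Decidable (Spec_eliminar arr tmp out) := by unfold Spec_eliminar; infer_instance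

-- ===== CLAIM (what is proved, stated in full; the proofs are below) =====
def Claim_equal_eliminar : Prop := ∀ (arr : List Int) (tmp : Option Int), Dom_eliminar arr tmp → Pre_eliminar arr tmp → Spec_eliminar arr tmp (eliminar arr tmp)

-- ===== LEMMAS AND PROOFS =====

theorem eliminar_eq_alt (arr : List Int) (tmp : Option Int) :
    eliminar arr tmp = eliminar_alt arr tmp := by
  by_cases h2 : arr.length ≤ 2
  · rw [eliminar, eliminar_alt]; simp [h2]
  · by_cases he : arr.length % 2 = 1
    · rw [eliminar, eliminar_alt]
      have h0 : ¬ arr.length % 2 = 0 := by omega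
      simp [h2, he, h0]
    · -- even length ≥ 4: A recurses once into its odd branch
      have hge : 4 ≤ arr.length := by omega
      have hdl : arr.dropLast.length = arr.length - 1 := by simp
      have step : eliminar arr tmp = eliminar arr.dropLast arr.getLast? := by
        rw [eliminar]; simp [h2, he]
      rw [step, eliminar, eliminar_alt]
      have h2' : ¬ arr.dropLast.length ≤ 2 := by omega
      have ho' : arr.dropLast.length % 2 = 1 := by omega
      have h3 : ¬ arr.length ≤ 3 := by omega
      have hm : (arr.length - 1) % 2 = 1 := by omega
      have h0' : arr.length % 2 = 0 := by omega
      simp [hdl, h3, hm, h2, h0']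

-- ===== VERDICT (by name: the statement is the Claim_ definition above) =====
theorem eliminar_spec : Claim_equal_eliminar := by
  intro arr tmp _ _
  unfold Spec_eliminar
  exact eliminar_eq_alt arr tmp
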